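-- pv_equiv track=rewrite | github.com/damianoimola/fundamentals-of-it-exercises | pre_practical_exam_function.py | r_palindrome_matrow_sums
-- ===== SOURCE A (Python) =====
-- def r_palindrome_matrow_sums(mat):
--     # @param mat : Matrix
--     if len(mat) == 0:
--         return True
--     elif len(mat) == 1:
--         return False
--     else:
--         if sum(mat[0]) == sum(mat[-1]):
--             return r_palindrome_matrow_sums(mat[1:-1])
--         else:
--             return False
-- ===== SOURCE B (Python) =====
-- def r_palindrome_matrow_sums(mat):
--     sums = [sum(row) for row in mat]
--     return len(sums) % 2 == 0 and sums == sums[::-1]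
-- ===== Notes on version B (the rewrite author's own statement) =====
-- stated objective: simpler
-- what changed: Replaced the recursive peel-first-and-last with repeated slicing by one pass computing all row sums followed by a single parity and palindrome (reverse-equality) check.
import Mathlib
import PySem

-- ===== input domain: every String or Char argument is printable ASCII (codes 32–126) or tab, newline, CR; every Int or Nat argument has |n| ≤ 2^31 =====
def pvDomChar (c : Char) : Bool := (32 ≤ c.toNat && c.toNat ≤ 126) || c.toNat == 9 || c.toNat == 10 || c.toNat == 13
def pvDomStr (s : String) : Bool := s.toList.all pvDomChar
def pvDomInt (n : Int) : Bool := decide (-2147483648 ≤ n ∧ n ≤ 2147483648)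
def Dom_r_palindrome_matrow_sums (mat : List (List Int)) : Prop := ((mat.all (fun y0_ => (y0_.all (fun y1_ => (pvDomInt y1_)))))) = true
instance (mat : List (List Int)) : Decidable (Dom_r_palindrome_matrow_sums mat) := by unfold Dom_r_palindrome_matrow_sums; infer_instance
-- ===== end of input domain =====

-- B replaces A's slice-and-recurse with one pass of row sums plus a parity and reverse-equality check (objective: simpler).


-- ===== PORT A =====
-- Port of A: recursion peeling mat[0]/mat[-1]; mat[1:-1] on a list of length ≥ 2
-- is exactly (drop 1).dropLast, mat[0] is the head, mat[-1] the last element.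
def r_palindrome_matrow_sums (mat : List (List Int)) : Bool :=
  match mat with
  | [] => true
  | [_] => false
  | a :: b :: t =>
      if a.sum = ((b :: t).getLast (by simp)).sum then
        r_palindrome_matrow_sums ((b :: t).dropLast)
      else false
termination_by mat.length
decreasing_by simp [List.length_dropLast]

-- ===== PORT B =====
-- B: compute all row sums once, then parity + palindrome check by reverse equality.
def r_palindrome_matrow_sums_alt (mat : List (List Int)) : Bool :=
  let sums := mat.map List.sum
  decide (sums.length % 2 = 0) && (sums == sums.reverse)

-- ===== PRECONDITION & SPEC =====
def Spec_r_palindrome_matrow_sums (mat : List (List Int)) (out : Bool) : Prop := out = r_palindrome_matrow_sums_alt mat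
instance (mat : List (List Int)) (out : Bool) : Decidable (Spec_r_palindrome_matrow_sums mat out) := by unfold Spec_r_palindrome_matrow_sums; infer_instance

-- ===== CLAIM (what is proved, stated in full; the proofs are below) =====
def Claim_equal_r_palindrome_matrow_sums : Prop := ∀ (mat : List (List Int)), Dom_r_palindrome_matrow_sums mat → Spec_r_palindrome_matrow_sums mat (r_palindrome_matrow_sums mat)

-- ===== LEMMAS AND PROOFS =====

lemma beqd (s t : List Int) : (s == t) = decide (s = t) := by
  rw [Bool.eq_iff_iff]; simp

lemma alt_decide (mat : List (List Int)) :
    r_palindrome_matrow_sums_alt mat =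
      decide ((mat.map List.sum).length % 2 = 0 ∧ mat.map List.sum = (mat.map List.sum).reverse) := by
  rw [r_palindrome_matrow_sums_alt]
  rw [beqd, ← Bool.decide_and]

lemma pal_step (x y : Int) (u : List Int) :
    (x :: (u ++ [y]) = (x :: (u ++ [y])).reverse) ↔ (x = y ∧ u = u.reverse) := by
  rw [List.reverse_cons, List.reverse_append]
  simp only [List.reverse_singleton, List.cons_append, List.cons.injEq]
  constructor
  · rintro ⟨rfl, h2⟩
    exact ⟨rfl, List.append_cancel_right h2⟩
  · rintro ⟨rfl, h2⟩
    exact ⟨rfl, by simp [← h2]⟩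

lemma key (n : Nat) : ∀ (mat : List (List Int)), mat.length ≤ n →
    r_palindrome_matrow_sums mat = r_palindrome_matrow_sums_alt mat := by
  induction n with
  | zero =>
    intro mat h
    have : mat = [] := List.eq_nil_of_length_eq_zero (Nat.le_zero.mp h)
    subst this
    simp [r_palindrome_matrow_sums, r_palindrome_matrow_sums_alt]
  | succ n ih =>
    intro mat h
    match mat with
    | [] => simp [r_palindrome_matrow_sums, r_palindrome_matrow_sums_alt]
    | [x] => simp [r_palindrome_matrow_sums, r_palindrome_matrow_sums_alt]
    | a :: b :: t =>
      have hne : (b :: t) ≠ ([] : List (List Int)) := by simp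
      set r := b :: t with hr
      have hdec : r.dropLast ++ [r.getLast hne] = r := List.dropLast_append_getLast hne
      set m := r.dropLast with hm
      set l := r.getLast hne with hl
      have hrec := ih m (by
        have h1 : m.length + 1 = r.length := by rw [← hdec]; simp
        have h2 : r.length + 1 ≤ n + 1 := by simpa using h
        omega)
      have hA : r_palindrome_matrow_sums (a :: r) =
          if a.sum = l.sum then r_palindrome_matrow_sums m else false := by
        rw [r_palindrome_matrow_sums]
      rw [hA, hrec]
      have hmat : a :: r = a :: (m ++ [l]) := by rw [hdec]
      rw [hmat, alt_decide, alt_decide]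
      set u := List.map List.sum m with hu
      have hmap : (a :: (m ++ [l])).map List.sum = a.sum :: (u ++ [l.sum]) := by
        simp [hu]
      rw [hmap]
      by_cases hal : a.sum = l.sum
      · rw [if_pos hal, decide_eq_decide, ← hal, pal_step]
        have hlen : (a.sum :: (u ++ [a.sum])).length = u.length + 2 := by simp
        rw [hlen]
        constructor
        · rintro ⟨h1, h2⟩
          exact ⟨by omega, rfl, h2⟩
        · rintro ⟨h1, _, h3⟩
          exact ⟨by omega, h3⟩
      · rw [if_neg hal]
        have : ¬ (a.sum :: (u ++ [l.sum]) = (a.sum :: (u ++ [l.sum])).reverse) := by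
          rw [pal_step]
          exact fun hc => hal hc.1
        simp only [this]
        rw [Bool.eq_iff_iff]
        simp

-- ===== VERDICT (by name: the statement is the Claim_ definition above) =====
theorem r_palindrome_matrow_sums_spec : Claim_equal_r_palindrome_matrow_sums := by
  intro mat _
  exact key mat.length mat (le_refl _)
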